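-- pv_equiv track=rewrite | github.com/bonjih/weighbridge | draw_label_print.py | group_predictions_sort
-- ===== SOURCE A (Python) =====
-- def group_predictions_sort(predictions):
--     """Group predictions by similar x coordinates.
--     Sort y from low to high (to get vertical numbers)
--     """
--     x_threshold = 10  # to group similar coordinates along x
--     # Sort predictions by x-coordinate before grouping
--     predictions.sort(key=lambda x: x[0])
--
--     grouped_predictions = []
--     current_group = []
--
--     for predict in predictions:
--         if not current_group:
--             current_group.append(predict)
--         else:
--             last_x = current_group[-1][0]
--             if abs(predict[0] - last_x) <= x_threshold:
--                 current_group.append(predict)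
--             else:
--                 grouped_predictions.append(current_group)
--                 current_group.sort(key=lambda x: x[1])
--                 current_group = [predict]
--
--     if current_group:
--         current_group.sort(key=lambda x: x[1])  # sort final group by y, low to high
--         grouped_predictions.append(current_group)
--
--     return grouped_predictions
-- ===== SOURCE B (Python) =====
-- def group_predictions_sort(predictions):
--     """Group predictions by similar x coordinates; each group sorted by y.
--     Divide and conquer: recursively compute the run-ranges of each half of the
--     x-sorted list and merge the two boundary runs when the midpoint gap is <= 10.
--     """
--     predictions.sort(key=lambda p: p[0])
--
--     def split(lo, hi):
--         if hi - lo <= 1: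
--             return [(lo, hi)] if lo < hi else []
--         mid = (lo + hi) // 2
--         left = split(lo, mid)
--         right = split(mid, hi)
--         if abs(predictions[mid][0] - predictions[mid - 1][0]) <= 10:
--             left[-1] = (left[-1][0], right[0][1])
--             right = right[1:]
--         return left + right
--
--     return [sorted(predictions[a:b], key=lambda p: p[1])
--             for a, b in split(0, len(predictions))]
-- ===== Notes on version B (the rewrite author's own statement) =====
-- stated objective: alternative
-- what changed: Replaces A's single-pass running current_group state machine with a divide-and-conquer recursion: the index range is split in half, run-ranges are computed recursively for each half and the two boundary runs are merged when the midpoint gap is <= 10; groups are then emitted as y-sorted slices in a separate pass.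
import Mathlib
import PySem

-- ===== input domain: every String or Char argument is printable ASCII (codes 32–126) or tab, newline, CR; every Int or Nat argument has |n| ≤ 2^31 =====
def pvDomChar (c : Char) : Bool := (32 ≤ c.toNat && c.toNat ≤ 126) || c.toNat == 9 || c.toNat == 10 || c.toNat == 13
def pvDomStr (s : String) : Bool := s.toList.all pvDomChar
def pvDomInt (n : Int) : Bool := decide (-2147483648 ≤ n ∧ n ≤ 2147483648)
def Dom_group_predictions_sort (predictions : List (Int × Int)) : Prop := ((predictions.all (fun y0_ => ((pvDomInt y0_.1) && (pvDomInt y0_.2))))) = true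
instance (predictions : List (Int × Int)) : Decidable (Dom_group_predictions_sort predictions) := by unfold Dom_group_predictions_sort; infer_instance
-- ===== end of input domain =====

-- B replaces A's single-pass running current_group state machine by a divide-and-conquer
-- recursion on index ranges (halve, recurse, merge the boundary runs when the midpoint gap
-- is <= 10), then emits each run as a y-sorted slice in a separate pass (alternative
-- decomposition; return-value equivalence only: both sort the input list in place).


-- ===== PORT A =====
-- one loop step of A: state = (grouped_predictions, current_group); when a group is flushed,
-- Python appends the list object and then sorts it in place (an alias), so the flushed group
-- lands in grouped_predictions already sorted by y.
def pvStepA (st : List (List (Int × Int)) × List (Int × Int)) (p : Int × Int) :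
    List (List (Int × Int)) × List (Int × Int) :=
  if st.2 = [] then (st.1, st.2 ++ [p])
  else
    let last_x := (PySem.List.pyGetD st.2 (-1) (0, 0)).1   -- current_group[-1][0]
    if (p.1 - last_x).natAbs ≤ 10 then (st.1, st.2 ++ [p])
    else (st.1 ++ [PySem.List.sorted st.2 (fun q => q.2) false], [p])

def group_predictions_sort (predictions : List (Int × Int)) : List (List (Int × Int)) :=
  let ps := PySem.List.sorted predictions (fun p => p.1) false
  let st := ps.foldl pvStepA ([], [])
  if st.2 = [] then st.1
  else st.1 ++ [PySem.List.sorted st.2 (fun q => q.2) false]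

-- ===== PORT B =====
-- B's inner `split(lo, hi)`: all indices are nonnegative throughout, so Nat arithmetic is
-- exact here ((lo+hi)//2 is Nat division); in the merge branch `left`/`right` are nonempty
-- (lo < mid < hi), so getLastD/headD are exact for left[-1]/right[0], `dropLast ++ [_]` is
-- the `left[-1] = …` assignment, `.tail` is right[1:]; predictions[mid] / [mid-1] are
-- nonnegative in-range indices, so getD is exact.
def pvSplit (xs : List (Int × Int)) (lo hi : Nat) : List (Nat × Nat) :=
  if hi - lo ≤ 1 then (if lo < hi then [(lo, hi)] else [])
  else
    let mid := (lo + hi) / 2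
    let left := pvSplit xs lo mid
    let right := pvSplit xs mid hi
    if ((xs.getD mid (0, 0)).1 - (xs.getD (mid - 1) (0, 0)).1).natAbs ≤ 10 then
      (left.dropLast ++ [((left.getLastD (0, 0)).1, (right.headD (0, 0)).2)]) ++ right.tail
    else left ++ right
termination_by hi - lo
decreasing_by all_goals omega

def group_predictions_sort_alt (predictions : List (Int × Int)) : List (List (Int × Int)) :=
  let ps := PySem.List.sorted predictions (fun p => p.1) false
  (pvSplit ps 0 ps.length).map (fun r =>
    PySem.List.sorted (PySem.List.slice ps (some (r.1 : Int)) (some (r.2 : Int))) (fun q => q.2) false)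

-- ===== PRECONDITION & SPEC =====
def Spec_group_predictions_sort (predictions : List (Int × Int)) (out : List (List (Int × Int))) : Prop := out = group_predictions_sort_alt predictions
instance (predictions : List (Int × Int)) (out : List (List (Int × Int))) : Decidable (Spec_group_predictions_sort predictions out) := by unfold Spec_group_predictions_sort; infer_instance

-- ===== CLAIM (what is proved, stated in full; the proofs are below) =====
def Claim_equal_group_predictions_sort : Prop := ∀ (predictions : List (Int × Int)), Dom_group_predictions_sort predictions → Spec_group_predictions_sort predictions (group_predictions_sort predictions)

-- ===== LEMMAS AND PROOFS =====

-- 'there is a gap (> 10) between xs[i-1] and xs[i]', as B's split tests it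
def pvGapB (xs : List (Int × Int)) (i : Nat) : Bool :=
  decide (¬ ((xs.getD i (0, 0)).1 - (xs.getD (i - 1) (0, 0)).1).natAbs ≤ 10)

-- pair up a boundary list: pvPairUp lo [c₁,…,cₖ] hi = [(lo,c₁),(c₁,c₂),…,(cₖ,hi)]
def pvPairUp (lo : Nat) (cs : List Nat) (hi : Nat) : List (Nat × Nat) :=
  match cs with
  | [] => [(lo, hi)]
  | c :: cs => (lo, c) :: pvPairUp c cs hi

theorem pvPairUp_ne_nil (lo : Nat) (cs : List Nat) (hi : Nat) : pvPairUp lo cs hi ≠ [] := by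
  cases cs <;> simp [pvPairUp]

theorem pvPairUp_append (as : List Nat) : ∀ (lo m : Nat) (bs : List Nat) (hi : Nat),
    pvPairUp lo (as ++ m :: bs) hi = pvPairUp lo as m ++ pvPairUp m bs hi := by
  induction as with
  | nil => intro lo m bs hi; simp [pvPairUp]
  | cons a t ih => intro lo m bs hi; simp [pvPairUp, ih]

theorem pvPairUp_merge (as : List Nat) : ∀ (lo mid : Nat) (bs : List Nat) (hi : Nat)
    (d : Nat × Nat),
    ((pvPairUp lo as mid).dropLast ++
        [(((pvPairUp lo as mid).getLastD d).1, ((pvPairUp mid bs hi).headD (0, 0)).2)]) ++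
      (pvPairUp mid bs hi).tail
    = pvPairUp lo (as ++ bs) hi := by
  induction as with
  | nil =>
    intro lo mid bs hi d
    cases bs <;> simp [pvPairUp]
  | cons a t ih =>
    intro lo mid bs hi d
    have hne := pvPairUp_ne_nil a t mid
    simp only [pvPairUp, List.dropLast_cons_of_ne_nil hne, List.getLastD_cons, List.cons_append]
    congr 1
    have := ih a mid bs hi (lo, a)
    simpa using this

-- B's divide-and-conquer split computes the gap-boundary pairing of [lo, hi)
theorem pvSplit_eq (xs : List (Int × Int)) : ∀ (k lo hi : Nat), hi - lo = k → lo < hi →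
    pvSplit xs lo hi
      = pvPairUp lo ((List.range' (lo + 1) (hi - lo - 1)).filter (pvGapB xs)) hi := by
  intro k
  induction k using Nat.strong_induction_on with
  | _ k ih =>
    intro lo hi hk hlt
    rw [pvSplit]
    by_cases h1 : hi - lo ≤ 1
    · rw [if_pos h1, if_pos hlt]
      have : hi - lo - 1 = 0 := by omega
      simp [this, pvPairUp]
    · rw [if_neg h1]
      have hml : lo < (lo + hi) / 2 := by omega
      have hmh : (lo + hi) / 2 < hi := by omega
      have hL := ih ((lo + hi) / 2 - lo) (by omega) lo ((lo + hi) / 2) rfl hml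
      have hR := ih (hi - (lo + hi) / 2) (by omega) ((lo + hi) / 2) hi rfl hmh
      have hrange : List.range' (lo + 1) (hi - lo - 1)
          = List.range' (lo + 1) ((lo + hi) / 2 - lo - 1)
            ++ ((lo + hi) / 2 :: List.range' ((lo + hi) / 2 + 1) (hi - (lo + hi) / 2 - 1)) := by
        have h := List.range'_append_1 (s := lo + 1) (m := (lo + hi) / 2 - lo - 1)
          (n := hi - (lo + hi) / 2)
        rw [show lo + 1 + ((lo + hi) / 2 - lo - 1) = (lo + hi) / 2 from by omega,
            show (lo + hi) / 2 - lo - 1 + (hi - (lo + hi) / 2) = hi - lo - 1 from by omega,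
            show hi - (lo + hi) / 2 = (hi - (lo + hi) / 2 - 1) + 1 from by omega,
            List.range'_succ] at h
        exact h.symm
      rw [hrange, List.filter_append]
      by_cases hg : ((xs.getD ((lo + hi) / 2) (0, 0)).1
          - (xs.getD ((lo + hi) / 2 - 1) (0, 0)).1).natAbs ≤ 10
      · rw [if_pos hg]
        have hgb : pvGapB xs ((lo + hi) / 2) = false := by
          unfold pvGapB; rw [decide_eq_false_iff_not]; simpa using hg
        have hf : List.filter (pvGapB xs)
            ((lo + hi) / 2 :: List.range' ((lo + hi) / 2 + 1) (hi - (lo + hi) / 2 - 1))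
            = List.filter (pvGapB xs) (List.range' ((lo + hi) / 2 + 1) (hi - (lo + hi) / 2 - 1)) := by
          rw [List.filter_cons, hgb]; simp
        rw [hf, hL, hR, pvPairUp_merge]
      · rw [if_neg hg]
        have hgb : pvGapB xs ((lo + hi) / 2) = true := by
          unfold pvGapB; rw [decide_eq_true_iff]; simpa using hg
        have hf : List.filter (pvGapB xs)
            ((lo + hi) / 2 :: List.range' ((lo + hi) / 2 + 1) (hi - (lo + hi) / 2 - 1))
            = (lo + hi) / 2 :: List.filter (pvGapB xs) (List.range' ((lo + hi) / 2 + 1) (hi - (lo + hi) / 2 - 1)) := by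
          rw [List.filter_cons, hgb]; simp
        rw [hf, hL, hR, pvPairUp_append]

-- current_group[-1] of a nonempty list is its last element
theorem pvPyGetD_neg_one (c : List (Int × Int)) (d : Int × Int) (h : c ≠ []) :
    PySem.List.pyGetD c (-1) d = c.getLast h := by
  unfold PySem.List.pyGetD PySem.List.pyGet? PySem.List.pyIdx?
  have hl : 0 < c.length := List.length_pos_iff.mpr h
  rw [if_neg (by omega), if_pos (by omega : -(c.length : Int) ≤ -1)]
  simp only [Option.bind_some, List.getLast_eq_getElem]
  rw [List.getElem?_eq_getElem (by omega)]
  simp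

-- A's loop-with-state equals the mapped y-sorted slices over the gap pairing: from state
-- (grouped = g, current_group = xs[start:i]) onward, A produces g ++ the groups of [start, n)
theorem pvMain (xs : List (Int × Int)) :
    ∀ (k i start : Nat) (g : List (List (Int × Int))),
      xs.length - i = k → start < i → i ≤ xs.length →
      (let st := (xs.drop i).foldl pvStepA (g, (xs.drop start).take (i - start));
       if st.2 = [] then st.1 else st.1 ++ [PySem.List.sorted st.2 (fun q => q.2) false])
      =
      g ++ (pvPairUp start ((List.range' i (xs.length - i)).filter (pvGapB xs)) xs.length).map
        (fun r => PySem.List.sorted (PySem.List.slice xs (some (r.1 : Int)) (some (r.2 : Int)))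
          (fun q => q.2) false) := by
  intro k
  induction k with
  | zero =>
    intro i start g hk hsi hil
    have hi : i = xs.length := by omega
    subst hi
    have hc : (xs.drop start).take (xs.length - start) = xs.drop start :=
      List.take_of_length_le (by simp)
    have hne : xs.drop start ≠ [] := by
      apply List.ne_nil_of_length_pos; simp; omega
    simp only [List.drop_length, List.foldl_nil, Nat.sub_self, List.range'_zero,
      List.filter_nil, pvPairUp, List.map_cons, List.map_nil, hc]
    rw [if_neg hne, PySem.List.slice_natCast, hc]
  | succ k ih =>
    intro i start g hk hsi hil
    have hlt : i < xs.length := by omega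
    have him : i - 1 < xs.length := by omega
    have hc : ((xs.drop start).take (i - start)).length = i - start := by
      simp; omega
    have hcne : (xs.drop start).take (i - start) ≠ [] := by
      apply List.ne_nil_of_length_pos; omega
    have hlast : PySem.List.pyGetD ((xs.drop start).take (i - start)) (-1) (0, 0) = xs[i - 1] := by
      rw [pvPyGetD_neg_one _ _ hcne, List.getLast_eq_getElem]
      rw [List.getElem_take, List.getElem_drop]
      congr 1; omega
    have hgd : xs.getD i (0, 0) = xs[i] := List.getD_eq_getElem _ _ hlt
    have hgdm : xs.getD (i - 1) (0, 0) = xs[i - 1] := List.getD_eq_getElem _ _ him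
    have hrange : List.range' i (xs.length - i) = i :: List.range' (i + 1) (xs.length - (i + 1)) := by
      rw [show xs.length - i = (xs.length - (i + 1)) + 1 by omega, List.range'_succ]
    rw [List.drop_eq_getElem_cons hlt, hrange]
    simp only [List.foldl_cons]
    by_cases hv : (xs[i].1 - xs[i - 1].1).natAbs ≤ 10
    · -- no gap: A extends current_group; i is not a boundary
      have hgb : pvGapB xs i = false := by
        unfold pvGapB; rw [decide_eq_false_iff_not, hgd, hgdm]; simpa using hv
      rw [List.filter_cons, hgb]
      simp only [Bool.false_eq_true, if_false]
      have hext : (xs.drop start).take (i + 1 - start)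
          = (xs.drop start).take (i - start) ++ [xs[i]] := by
        rw [show i + 1 - start = (i - start) + 1 by omega, List.take_add_one]
        congr 1
        rw [List.getElem?_drop, show start + (i - start) = i by omega,
            List.getElem?_eq_getElem hlt]
        rfl
      have hA : pvStepA (g, (xs.drop start).take (i - start)) xs[i]
          = (g, (xs.drop start).take (i + 1 - start)) := by
        unfold pvStepA
        rw [if_neg hcne]
        simp only [hlast]
        rw [if_pos hv, hext]
      rw [hA]
      have := ih (i + 1) start g (by omega) (by omega) (by omega)
      simpa using this
    · -- gap: A flushes the sorted current group xs[start:i]; i is a boundary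
      have hgb : pvGapB xs i = true := by
        unfold pvGapB; rw [decide_eq_true_iff, hgd, hgdm]; simpa using hv
      rw [List.filter_cons, hgb, if_pos rfl]
      have hA : pvStepA (g, (xs.drop start).take (i - start)) xs[i]
          = (g ++ [PySem.List.sorted ((xs.drop start).take (i - start)) (fun q => q.2) false],
             [xs[i]]) := by
        unfold pvStepA
        rw [if_neg hcne]
        simp only [hlast]
        rw [if_neg hv]
      rw [hA]
      have := ih (i + 1) i
        (g ++ [PySem.List.sorted ((xs.drop start).take (i - start)) (fun q => q.2) false])
        (by omega) (by omega) (by omega)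
      rw [show i + 1 - i = 1 by omega,
          show (xs.drop i).take 1 = [xs[i]] from by rw [List.drop_eq_getElem_cons hlt]; rfl] at this
      rw [this]
      simp only [pvPairUp, List.map_cons, List.append_assoc, List.cons_append, List.nil_append]
      rw [PySem.List.slice_natCast]

-- ===== VERDICT (by name: the statement is the Claim_ definition above) =====
theorem group_predictions_sort_spec : Claim_equal_group_predictions_sort := by
  intro predictions _
  unfold Spec_group_predictions_sort group_predictions_sort group_predictions_sort_alt
  cases hps : PySem.List.sorted predictions (fun p => p.1) false with
  | nil => simp [pvSplit.eq_def]
  | cons p t =>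
    have h1 : 1 ≤ (p :: t).length := by simp
    have hstep : pvStepA ([], []) p = ([], [p]) := by unfold pvStepA; simp
    have hm := pvMain (p :: t) ((p :: t).length - 1) 1 0 [] (by omega) (by omega) h1
    have hs := pvSplit_eq (p :: t) ((p :: t).length) 0 ((p :: t).length) (by omega) (by omega)
    simp only [List.drop_one, List.drop_zero, List.tail_cons] at hm
    simp only [List.foldl_cons, hstep]
    rw [hs]
    simpa using hm
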